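-- pv_equiv track=rewrite | github.com/slotkasu/test_slot | netkeiba/blog/views.py | danraku
-- ===== SOURCE A (Python) =====
-- def danraku(ls):
-- 	temp_list = []
-- 	temp = []
-- 	for i in ls:
-- 		temp.append(i)
-- 		if((i+1) % 10) == 0:
-- 			temp_list.append(temp)
-- 			temp = []
-- 	return temp_list
-- ===== SOURCE B (Python) =====
-- def danraku(ls):
--     temp_list = []
--     prev = 0
--     for j, x in enumerate(ls):
--         if (x + 1) % 10 == 0:
--             temp_list.append(ls[prev:j + 1])
--             prev = j + 1
--     return temp_list
-- ===== Notes on version B (the rewrite author's own statement) =====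
-- stated objective: alternative
-- what changed: Replaced A's accumulator pair (temp_list, temp) built element by element with an index-based scan: enumerate ls, and at each boundary element ((x+1)%10==0) emit the group as the slice ls[prev:j+1] and advance prev; the unflushed tail after the last boundary is dropped by both.
import Mathlib
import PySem

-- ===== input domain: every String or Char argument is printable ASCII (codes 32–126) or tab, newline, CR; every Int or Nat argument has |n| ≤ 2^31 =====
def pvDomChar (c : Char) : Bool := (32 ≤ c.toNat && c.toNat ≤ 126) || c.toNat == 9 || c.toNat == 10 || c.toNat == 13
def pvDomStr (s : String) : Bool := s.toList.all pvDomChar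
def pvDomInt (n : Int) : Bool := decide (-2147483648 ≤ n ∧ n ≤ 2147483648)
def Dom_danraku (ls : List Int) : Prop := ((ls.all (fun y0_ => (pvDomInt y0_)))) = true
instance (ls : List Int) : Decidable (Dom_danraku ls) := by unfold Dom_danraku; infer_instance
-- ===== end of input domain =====

-- B replaces A's element-by-element accumulator list by an index-based decomposition:
-- scan enumerate(ls) for boundaries and emit each group as a slice ls[prev:j+1] (objective: alternative).


-- ===== PORT A =====
-- A's loop body: carry (temp_list, temp); append i to temp, flush temp at a boundary.
def stepA (s : List (List Int) × List Int) (i : Int) : List (List Int) × List Int :=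
  let temp := s.2 ++ [i]
  if PySem.Int.mod (i + 1) 10 == 0 then (s.1 ++ [temp], ([] : List Int)) else (s.1, temp)

def danraku (ls : List Int) : List (List Int) :=
  (ls.foldl stepA (([] : List (List Int)), ([] : List Int))).1

-- ===== PORT B =====
-- B's loop body: carry (temp_list, prev); at a boundary j append the slice ls[prev:j+1] and set prev = j+1.
def stepB (ls : List Int) (s : List (List Int) × Int) (p : Int × Int) : List (List Int) × Int :=
  if PySem.Int.mod (p.2 + 1) 10 == 0 then
    (s.1 ++ [PySem.List.slice ls (some s.2) (some (p.1 + 1))], p.1 + 1)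
  else s

def danraku_alt (ls : List Int) : List (List Int) :=
  ((PySem.List.enumerate ls 0).foldl (stepB ls) (([] : List (List Int)), (0 : Int))).1

-- ===== PRECONDITION & SPEC =====
def Spec_danraku (ls : List Int) (out : List (List Int)) : Prop := out = danraku_alt ls
instance (ls : List Int) (out : List (List Int)) : Decidable (Spec_danraku ls out) := by unfold Spec_danraku; infer_instance

-- ===== CLAIM (what is proved, stated in full; the proofs are below) =====
def Claim_equal_danraku : Prop := ∀ (ls : List Int), Dom_danraku ls → Spec_danraku ls (danraku ls)

-- ===== LEMMAS AND PROOFS =====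

-- Extending A's temp (a take of a drop of ls) by the next element ls[pre.length] is the longer take.
theorem temp_extend (pre suf' : List Int) (x : Int) (prev : Nat) (hprev : prev ≤ pre.length) :
    (((pre ++ x :: suf').drop prev).take (pre.length - prev)) ++ [x]
      = ((pre ++ x :: suf').drop prev).take (pre.length + 1 - prev) := by
  have hidx : ((pre ++ x :: suf').drop prev)[pre.length - prev]? = some x := by
    rw [List.getElem?_drop]
    have h1 : prev + (pre.length - prev) = pre.length := by omega
    rw [h1, List.getElem?_append_right (Nat.le_refl _)]
    simp
  have h2 : pre.length + 1 - prev = (pre.length - prev) + 1 := by omega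
  rw [h2, List.take_succ, hidx]
  rfl

-- The two loop bodies, run over the same suffix of ls, produce the same first component,
-- provided A's temp is exactly the ls[prev : k] slice B's prev-index denotes (k = pre.length).
theorem loop_eq (suf : List Int) : ∀ (pre ls : List Int) (out : List (List Int)) (prev : Nat),
    ls = pre ++ suf → prev ≤ pre.length →
    (suf.foldl stepA (out, (ls.drop prev).take (pre.length - prev))).1
      = ((PySem.List.enumerate suf (pre.length : Int)).foldl (stepB ls) (out, (prev : Int))).1 := by
  induction suf with
  | nil => intro pre ls out prev hls hprev; simp [PySem.List.enumerate_nil]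
  | cons x suf' ih =>
      intro pre ls out prev hls hprev
      rw [PySem.List.enumerate_cons, List.foldl_cons, List.foldl_cons]
      by_cases hp : PySem.Int.mod (x + 1) 10 == 0
      · -- boundary: A flushes temp ++ [x]; B appends the slice ls[prev : pre.length+1]
        have hstepA : stepA (out, (ls.drop prev).take (pre.length - prev)) x
            = (out ++ [(ls.drop prev).take (pre.length + 1 - prev)], ([] : List Int)) := by
          rw [stepA]
          simp only [hp, if_true]
          rw [hls, temp_extend pre suf' x prev hprev]
        have hstepB : stepB ls (out, (prev : Int)) ((pre.length : Int), x)
            = (out ++ [(ls.drop prev).take (pre.length + 1 - prev)], ((pre.length : Int) + 1)) := by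
          rw [stepB]
          simp only [hp, if_true]
          have hc : ((pre.length : Int) + 1) = ((pre.length + 1 : Nat) : Int) := by push_cast; ring
          rw [hc, PySem.List.slice_natCast]
        rw [hstepA, hstepB]
        have hc1 : ((pre.length : Int) + 1) = (((pre ++ [x]).length : Nat) : Int) := by
          simp
        rw [hc1]
        have := ih (pre ++ [x]) ls (out ++ [(ls.drop prev).take (pre.length + 1 - prev)]) (pre.length + 1)
          (by rw [hls]; simp) (by simp)
        simpa using this
      · -- no boundary: A extends temp; B's state is unchanged
        have hstepA : stepA (out, (ls.drop prev).take (pre.length - prev)) x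
            = (out, (ls.drop prev).take (pre.length + 1 - prev)) := by
          rw [stepA]
          simp only [hp, Bool.false_eq_true, if_false]
          rw [hls, temp_extend pre suf' x prev hprev]
        have hstepB : stepB ls (out, (prev : Int)) ((pre.length : Int), x) = (out, (prev : Int)) := by
          rw [stepB]
          simp only [hp, Bool.false_eq_true, if_false]
        rw [hstepA, hstepB]
        have hc1 : ((pre.length : Int) + 1) = (((pre ++ [x]).length : Nat) : Int) := by
          simp
        rw [hc1]
        have := ih (pre ++ [x]) ls out prev (by rw [hls]; simp) (by simp; omega)
        simpa using this

-- ===== VERDICT (by name: the statement is the Claim_ definition above) =====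
theorem danraku_spec : Claim_equal_danraku := by
  intro ls _
  unfold Spec_danraku danraku danraku_alt
  have := loop_eq ls [] ls [] 0 (by simp) (by simp)
  simpa using this
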